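-- pv_equiv track=rewrite | github.com/WeizhenWang-1210/MetaVQA | vqa/utils/common_utils.py | divide_into_intervals_exclusive
-- ===== SOURCE A (Python) =====
-- def divide_into_intervals_exclusive(total, n, start=0):
--     """
--     Divides a `[start, total)` range into `n` exclusive intervals, starting from a given start point.
--
--     Args:
--         total (int): The total size of the range to be divided.
--         n (int): The number of intervals to create.
--         start (int): The starting point of the range. Default is 0.
--     Returns:
--         intervals (List[Tuple[int, int]]): A list of tuples representing the start and exclusive end of each interval.
--     """
--     # Calculate the basic size of each interval and the remainder
--     interval_size, remainder = divmod(total, n)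
--     intervals = []
--     for i in range(n):
--         # Determine the exclusive end of the current interval
--         # If there's a remainder, distribute it among the first few intervals
--         end = start + interval_size + (1 if i < remainder else 0)
--         # Add the interval to the list, note that the 'end' is now exclusive
--         intervals.append((start, end))
--         # Update the start for the next interval
--         start = end
--     return intervals
-- ===== SOURCE B (Python) =====
-- def divide_into_intervals_exclusive(total, n, start=0):
--     interval_size, remainder = divmod(total, n)
--     return [(start + i * interval_size + min(i, remainder),
--              start + (i + 1) * interval_size + min(i + 1, remainder))
--             for i in range(n)]
-- ===== Notes on version B (the rewrite author's own statement) =====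
-- stated objective: alternative
-- what changed: B replaces A's sequential start=end accumulator loop with a stateless comprehension computing each interval's bounds from a closed form (start + i*size + min(i, remainder)).
import Mathlib
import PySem

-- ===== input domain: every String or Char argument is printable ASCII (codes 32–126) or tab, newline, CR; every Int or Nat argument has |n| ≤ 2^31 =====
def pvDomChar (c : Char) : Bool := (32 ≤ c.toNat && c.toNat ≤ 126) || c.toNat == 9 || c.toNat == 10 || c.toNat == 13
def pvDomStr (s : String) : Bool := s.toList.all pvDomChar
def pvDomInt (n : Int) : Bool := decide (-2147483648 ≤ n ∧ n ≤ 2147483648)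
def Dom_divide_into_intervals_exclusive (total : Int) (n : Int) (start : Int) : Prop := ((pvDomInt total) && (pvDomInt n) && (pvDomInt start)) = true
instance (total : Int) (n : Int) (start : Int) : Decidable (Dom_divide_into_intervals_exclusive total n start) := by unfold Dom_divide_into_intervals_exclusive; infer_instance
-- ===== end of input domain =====

-- B replaces A's running accumulator with a closed form per interval; equal return values on n ≠ 0 (both raise ZeroDivisionError at n = 0).

-- ===== PORT A =====
def divide_into_intervals_exclusive (total : Int) (n : Int) (start : Int) : List (Int × Int) :=
  let interval_size := PySem.Int.floordiv total n
  let remainder := PySem.Int.mod total n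
  let res := (PySem.List.pyRange 0 n 1).foldl
    (fun (st : List (Int × Int) × Int) (i : Int) =>
      let e := st.2 + interval_size + (if i < remainder then 1 else 0)
      (st.1 ++ [(st.2, e)], e))
    ([], start)
  res.1

-- ===== PORT B =====
def divide_into_intervals_exclusive_alt (total : Int) (n : Int) (start : Int) : List (Int × Int) :=
  let interval_size := PySem.Int.floordiv total n
  let remainder := PySem.Int.mod total n
  (PySem.List.pyRange 0 n 1).map
    (fun i => (start + i * interval_size + min i remainder,
               start + (i + 1) * interval_size + min (i + 1) remainder))

-- ===== PRECONDITION & SPEC =====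
-- Pre_ excludes exactly n = 0, where Python A raises ZeroDivisionError (divmod by zero); B raises there too.
def Pre_divide_into_intervals_exclusive (total : Int) (n : Int) (start : Int) : Prop := n ≠ 0
instance (total : Int) (n : Int) (start : Int) : Decidable (Pre_divide_into_intervals_exclusive total n start) := by unfold Pre_divide_into_intervals_exclusive; infer_instance
def pvWitness_divide_into_intervals_exclusive : Int × Int × Int := (10, 3, 2)
def Spec_divide_into_intervals_exclusive (total : Int) (n : Int) (start : Int) (out : List (Int × Int)) : Prop := out = divide_into_intervals_exclusive_alt total n start
instance (total : Int) (n : Int) (start : Int) (out : List (Int × Int)) : Decidable (Spec_divide_into_intervals_exclusive total n start out) := by unfold Spec_divide_into_intervals_exclusive; infer_instance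

-- ===== CLAIM (what is proved, stated in full; the proofs are below) =====
def Claim_equal_divide_into_intervals_exclusive : Prop := ∀ (total : Int) (n : Int) (start : Int), Dom_divide_into_intervals_exclusive total n start → Pre_divide_into_intervals_exclusive total n start → Spec_divide_into_intervals_exclusive total n start (divide_into_intervals_exclusive total n start)

-- ===== LEMMAS AND PROOFS =====

-- Fold invariant: starting the fold at index a with running start s + a*q + min a r yields the closed-form tail.
lemma pv_fold_closed (q r s : Int) :
    ∀ (m : Nat) (a : Int), 0 ≤ a → ∀ (acc : List (Int × Int)),
    ((PySem.List.pyRange a (a + m) 1).foldl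
      (fun (st : List (Int × Int) × Int) (i : Int) =>
        let e := st.2 + q + (if i < r then 1 else 0)
        (st.1 ++ [(st.2, e)], e))
      (acc, s + a * q + min a r)).1
    = acc ++ (PySem.List.pyRange a (a + m) 1).map
        (fun i => (s + i * q + min i r, s + (i + 1) * q + min (i + 1) r)) := by
  intro m
  induction m with
  | zero =>
    intro a ha acc
    rw [PySem.List.pyRange_one_eq_nil (by omega)]
    simp
  | succ k ih =>
    intro a ha acc
    rw [PySem.List.pyRange_one_cons (by omega : a < a + (k + 1 : Nat))]
    simp only [List.foldl_cons, List.map_cons]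
    have hstep : (s + a * q + min a r) + q + (if a < r then 1 else 0)
        = s + (a + 1) * q + min (a + 1) r := by
      split_ifs with h <;> [skip; skip] <;>
        · have := min_def a r
          ring_nf
          omega
    have harg : a + (k + 1 : Nat) = (a + 1) + (k : Nat) := by push_cast; ring
    rw [harg] at *
    have := ih (a + 1) (by omega) (acc ++ [(s + a * q + min a r, s + (a + 1) * q + min (a + 1) r)])
    simp only [hstep]
    rw [this]
    simp

-- ===== VERDICT (by name: the statement is the Claim_ definition above) =====
theorem divide_into_intervals_exclusive_spec : Claim_equal_divide_into_intervals_exclusive := by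
  intro total n start _ hn
  unfold Spec_divide_into_intervals_exclusive divide_into_intervals_exclusive divide_into_intervals_exclusive_alt
  by_cases hpos : 0 < n
  · have hr : 0 ≤ PySem.Int.mod total n := by
      rw [PySem.Int.mod_eq_emod_of_pos hpos]
      exact Int.emod_nonneg _ (by omega)
    have h0 : (0 : Int) + (n.toNat : Nat) = n := by omega
    have := pv_fold_closed (PySem.Int.floordiv total n) (PySem.Int.mod total n) start n.toNat 0 le_rfl []
    rw [h0] at this
    simpa [min_eq_left hr] using this
  · rw [PySem.List.pyRange_one_eq_nil (by omega)]
    simp
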